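-- pv_equiv track=rewrite | github.com/armanisadeghi/ame-team | knowledge/doc_manipulation/text_classification/text_classifier.py | limit_consecutive_empty_lines
-- ===== SOURCE A (Python) =====
-- def limit_consecutive_empty_lines(
--                                   document: str,
--                                   max_empty_lines=2) -> str:
--     """
--     Limits the number of consecutive empty lines in a given text.
--
--     Args:
--         document (str): The input text to be processed.
--         max_empty_lines (int): The maximum number of consecutive empty lines allowed.
--
--     Returns:
--         str: The cleaned text with limited consecutive empty lines.
--     """
--     lines = document.split('\n')
--     cleaned_lines = []
--     empty_count = 0
--
--     for line in lines:
--         if not line.strip():  # If the line is empty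
--             if empty_count < max_empty_lines:
--                 cleaned_lines.append(line)
--             empty_count += 1
--         else:
--             cleaned_lines.append(line)
--             empty_count = 0  # Reset the count for non-empty lines
--
--     return '\n'.join(cleaned_lines)
-- ===== SOURCE B (Python) =====
-- from itertools import groupby
--
-- def limit_consecutive_empty_lines(document: str, max_empty_lines=2) -> str:
--     out = []
--     for is_empty, grp in groupby(document.split('\n'), key=lambda l: not l.strip()):
--         g = list(grp)
--         out.extend(g[:max(0, max_empty_lines)] if is_empty else g)
--     return '\n'.join(out)
-- ===== Notes on version B (the rewrite author's own statement) =====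
-- stated objective: idiomatic
-- what changed: Replaces the per-line empty-counter loop by itertools.groupby over the lines keyed on emptiness, slicing each empty run to the first max(0, max_empty_lines) lines.
import Mathlib
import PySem

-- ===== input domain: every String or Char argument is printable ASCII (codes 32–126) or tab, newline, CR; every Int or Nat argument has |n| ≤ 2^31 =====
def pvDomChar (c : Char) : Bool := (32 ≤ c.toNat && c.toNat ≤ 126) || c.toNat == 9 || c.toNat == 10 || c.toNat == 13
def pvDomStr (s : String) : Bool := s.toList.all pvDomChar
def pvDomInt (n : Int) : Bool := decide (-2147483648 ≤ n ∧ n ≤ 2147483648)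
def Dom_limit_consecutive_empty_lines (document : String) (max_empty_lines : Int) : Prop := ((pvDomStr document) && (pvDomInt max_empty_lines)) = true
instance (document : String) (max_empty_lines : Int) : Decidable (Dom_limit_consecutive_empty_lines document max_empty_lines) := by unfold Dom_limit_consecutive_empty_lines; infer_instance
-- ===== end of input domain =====

-- B caps each run of blank lines by grouping consecutive same-emptiness lines and slicing each
-- empty run, instead of A's running empty-line counter (objective: more idiomatic, same cost).

-- shared helper: Python's "not line.strip()" (whitespace-only line)
def pvLineEmpty (l : String) : Bool := PySem.Str.len (PySem.Str.strip l) == 0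

-- ===== PORT A =====
def limit_consecutive_empty_lines (document : String) (max_empty_lines : Int) : String :=
  let lines := (PySem.Str.split? document "\n").getD []  -- sep ≠ "", so split? is always some
  let res := lines.foldl (fun (st : List String × Int) line =>
      if pvLineEmpty line then
        (if st.2 < max_empty_lines then st.1 ++ [line] else st.1, st.2 + 1)
      else
        (st.1 ++ [line], 0)) ([], 0)
  PySem.Str.join "\n" res.1

-- ===== PORT B =====
-- itertools.groupby over the lines, keyed on emptiness: maximal runs of same-key lines
def pvGroupRuns (ls : List String) : List (Bool × List String) :=
  match ls with
  | [] => []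
  | l :: rest =>
    let k := pvLineEmpty l
    (k, l :: rest.takeWhile (fun x => pvLineEmpty x == k)) ::
      pvGroupRuns (rest.dropWhile (fun x => pvLineEmpty x == k))
termination_by ls.length
decreasing_by
  have := List.length_dropWhile_le (fun x => pvLineEmpty x == pvLineEmpty l) rest
  simp; omega

def limit_consecutive_empty_lines_alt (document : String) (max_empty_lines : Int) : String :=
  -- sep ≠ "", so split? is always some
  let out := (pvGroupRuns ((PySem.Str.split? document "\n").getD [])).foldl
    (fun acc p =>
      -- g[:max(0, max_empty_lines)] with a nonnegative bound is List.take
      acc ++ (if p.1 then p.2.take (max 0 max_empty_lines).toNat else p.2)) []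
  PySem.Str.join "\n" out

-- ===== PRECONDITION & SPEC =====
def Spec_limit_consecutive_empty_lines (document : String) (max_empty_lines : Int) (out : String) : Prop := out = limit_consecutive_empty_lines_alt document max_empty_lines
instance (document : String) (max_empty_lines : Int) (out : String) : Decidable (Spec_limit_consecutive_empty_lines document max_empty_lines out) := by unfold Spec_limit_consecutive_empty_lines; infer_instance

-- ===== CLAIM (what is proved, stated in full; the proofs are below) =====
def Claim_equal_limit_consecutive_empty_lines : Prop := ∀ (document : String) (max_empty_lines : Int), Dom_limit_consecutive_empty_lines document max_empty_lines → Spec_limit_consecutive_empty_lines document max_empty_lines (limit_consecutive_empty_lines document max_empty_lines)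

-- ===== LEMMAS AND PROOFS =====

-- the kept lines of A's loop, as a function of the running counter
def pvKeep (m : Int) (cnt : Int) : List String → List String
  | [] => []
  | l :: ls =>
    if pvLineEmpty l then
      (if cnt < m then [l] else []) ++ pvKeep m (cnt + 1) ls
    else
      l :: pvKeep m 0 ls

theorem pvFoldl_eq_keep (m : Int) (ls : List String) (acc : List String) (cnt : Int) :
    (ls.foldl (fun (st : List String × Int) line =>
      if pvLineEmpty line then
        (if st.2 < m then st.1 ++ [line] else st.1, st.2 + 1)
      else
        (st.1 ++ [line], 0)) (acc, cnt)).1 = acc ++ pvKeep m cnt ls := by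
  induction ls generalizing acc cnt with
  | nil => simp [pvKeep]
  | cons l ls ih =>
    simp only [List.foldl_cons, pvKeep]
    by_cases he : pvLineEmpty l <;> by_cases hc : cnt < m <;>
      simp [he, hc, ih]

-- a run of empty lines: the counter keeps exactly the first (M - cnt) of it
theorem pvKeep_empty_run (m : Int) (es rest : List String)
    (he : ∀ l ∈ es, pvLineEmpty l = true) (cnt : Int) (hc : 0 ≤ cnt) :
    pvKeep m cnt (es ++ rest)
      = es.take ((max 0 m).toNat - cnt.toNat) ++ pvKeep m (cnt + es.length) rest := by
  induction es generalizing cnt with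
  | nil => simp
  | cons e es ih =>
    have hee : pvLineEmpty e = true := he e (by simp)
    have hes : ∀ l ∈ es, pvLineEmpty l = true := fun l hl => he l (by simp [hl])
    simp only [List.cons_append, pvKeep, hee]
    rw [ih hes (cnt + 1) (by omega)]
    have harith : cnt + 1 + (es.length : Int) = cnt + ((es.length : Int) + 1) := by ring
    by_cases hc' : cnt < m
    · have hnat : (max 0 m).toNat - cnt.toNat = ((max 0 m).toNat - (cnt + 1).toNat) + 1 := by omega
      simp [hc', hnat, List.take_succ_cons, harith]
    · have h1 : (max 0 m).toNat - cnt.toNat = 0 := by omega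
      have h2 : (max 0 m).toNat - (cnt + 1).toNat = 0 := by omega
      simp [hc', h1, h2, harith]

-- a run of non-empty lines is kept verbatim, with the counter staying at 0
theorem pvKeep_nonempty_run (m : Int) (ns rest : List String)
    (hn : ∀ l ∈ ns, pvLineEmpty l = false) :
    pvKeep m 0 (ns ++ rest) = ns ++ pvKeep m 0 rest := by
  induction ns with
  | nil => simp
  | cons n ns ih =>
    have hne : pvLineEmpty n = false := hn n (by simp)
    simp [pvKeep, hne, ih (fun l hl => hn l (by simp [hl]))]

-- the counter is irrelevant when the next line is non-empty (or there is none)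
theorem pvKeep_head_nonempty (m cnt : Int) (r : String) (rs : List String)
    (hr : pvLineEmpty r = false) : pvKeep m cnt (r :: rs) = pvKeep m 0 (r :: rs) := by
  simp [pvKeep, hr]

theorem pvDropWhile_head_false {α : Type} (p : α → Bool) (l : List α) :
    l.dropWhile p = [] ∨ ∃ r rs, l.dropWhile p = r :: rs ∧ p r = false := by
  induction l with
  | nil => simp
  | cons x xs ih =>
    by_cases hx : p x
    · simpa [hx] using ih
    · exact Or.inr ⟨x, xs, by simp [List.dropWhile_cons, hx], by simpa using hx⟩

theorem pvFoldl_append {α : Type} (h : α → List String) (gs : List α) (acc : List String) :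
    gs.foldl (fun acc p => acc ++ h p) acc = acc ++ gs.flatMap h := by
  induction gs generalizing acc with
  | nil => simp
  | cons g gs ih => simp [ih]

set_option maxHeartbeats 1000000 in
theorem pvKeep_eq_groups (m : Int) (N : Nat) (ls : List String) (hN : ls.length ≤ N) :
    pvKeep m 0 ls = (pvGroupRuns ls).flatMap
      (fun p => if p.1 then p.2.take (max 0 m).toNat else p.2) := by
  induction N generalizing ls with
  | zero =>
    have : ls = [] := List.eq_nil_of_length_eq_zero (by omega)
    simp [this, pvKeep, pvGroupRuns]
  | succ N ih =>
    cases ls with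
    | nil => simp [pvKeep, pvGroupRuns]
    | cons l tail =>
      rw [pvGroupRuns]
      simp only [List.flatMap_cons]
      set k := pvLineEmpty l with hk
      have hsplit : tail = tail.takeWhile (fun x => pvLineEmpty x == k)
          ++ tail.dropWhile (fun x => pvLineEmpty x == k) :=
        (List.takeWhile_append_dropWhile).symm
      have hlen : (tail.dropWhile (fun x => pvLineEmpty x == k)).length ≤ N := by
        have h1 := List.length_dropWhile_le (fun x => pvLineEmpty x == k) tail
        simp at hN; omega
      have htw : ∀ x ∈ tail.takeWhile (fun x => pvLineEmpty x == k), pvLineEmpty x = k := by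
        intro x hx
        have := List.mem_takeWhile_imp hx
        simpa using this
      cases hkk : k with
      | true =>
        have hrun : ∀ x ∈ l :: tail.takeWhile (fun x => pvLineEmpty x == k),
            pvLineEmpty x = true := by
          intro x hx
          rcases List.mem_cons.mp hx with rfl | hx
          · rw [hk] at hkk; exact hkk
          · rw [htw x hx, hkk]
        have hct : l :: tail
            = (l :: tail.takeWhile (fun x => pvLineEmpty x == k))
              ++ tail.dropWhile (fun x => pvLineEmpty x == k) := by
          rw [List.cons_append, ← hsplit]
        have hmain : pvKeep m 0 (l :: tail)
            = (l :: tail.takeWhile (fun x => pvLineEmpty x == k)).take ((max 0 m).toNat)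
              ++ pvKeep m 0 (tail.dropWhile (fun x => pvLineEmpty x == k)) := by
          conv_lhs => rw [hct]
          rw [pvKeep_empty_run m _ _ hrun 0 le_rfl]
          have hdw : ∀ cnt : Int, pvKeep m cnt (tail.dropWhile (fun x => pvLineEmpty x == k))
              = pvKeep m 0 (tail.dropWhile (fun x => pvLineEmpty x == k)) := by
            intro cnt
            rcases pvDropWhile_head_false (fun x => pvLineEmpty x == k) tail with hnil | ⟨r, rs, heq, hpr⟩
            · simp [hnil, pvKeep]
            · rw [hkk] at hpr
              rw [heq, pvKeep_head_nonempty m cnt r rs (by simpa using hpr)]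
          rw [hdw]
          simp
        rw [hmain, ih _ hlen, hkk]
        simp
      | false =>
        have hrun : ∀ x ∈ l :: tail.takeWhile (fun x => pvLineEmpty x == k),
            pvLineEmpty x = false := by
          intro x hx
          rcases List.mem_cons.mp hx with rfl | hx
          · rw [hk] at hkk; exact hkk
          · rw [htw x hx, hkk]
        have hct : l :: tail
            = (l :: tail.takeWhile (fun x => pvLineEmpty x == k))
              ++ tail.dropWhile (fun x => pvLineEmpty x == k) := by
          rw [List.cons_append, ← hsplit]
        have hmain : pvKeep m 0 (l :: tail)
            = (l :: tail.takeWhile (fun x => pvLineEmpty x == k))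
              ++ pvKeep m 0 (tail.dropWhile (fun x => pvLineEmpty x == k)) := by
          conv_lhs => rw [hct]
          exact pvKeep_nonempty_run m _ _ hrun
        rw [hmain, ih _ hlen, hkk]
        simp

-- ===== VERDICT (by name: the statement is the Claim_ definition above) =====
theorem limit_consecutive_empty_lines_spec : Claim_equal_limit_consecutive_empty_lines := by
  intro document m _
  unfold Spec_limit_consecutive_empty_lines
  simp only [limit_consecutive_empty_lines, limit_consecutive_empty_lines_alt]
  rw [pvFoldl_eq_keep, pvKeep_eq_groups m _ _ le_rfl, pvFoldl_append]
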